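-- pv_equiv track=rewrite | github.com/JayFzh/gpu_resource | scripts/run_data_generate.py | _get_fusion_groups
-- ===== SOURCE A (Python) =====
-- max_group_num = 12
--
-- def _get_fusion_groups(tensor_num):
--     group_specs = []
--     for group_size in range(2, max_group_num+1):
--         size_per_group = tensor_num // group_size
--         group_spec = [size_per_group for i in range(group_size)]
--         for i in range(tensor_num - size_per_group * group_size):
--             group_spec[i] += 1
--         group_specs.append(group_spec)
--     return group_specs
-- ===== SOURCE B (Python) =====
-- max_group_num = 12
--
-- def _get_fusion_groups(tensor_num):
--     def greedy(remaining, slots):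
--         # give the next slot ceil(remaining / slots) tensors, recurse on the rest
--         if slots == 0:
--             return []
--         take = -(-remaining // slots)
--         return [take] + greedy(remaining - take, slots - 1)
--     return [greedy(tensor_num, group_size) for group_size in range(2, max_group_num + 1)]
-- ===== Notes on version B (the rewrite author's own statement) =====
-- stated objective: alternative
-- what changed: Each group is built by a greedy recursion that repeatedly hands the next slot ceil(remaining/slots) tensors and recurses on the shrunken remainder, instead of A's fill-a-constant-list-then-increment-a-prefix two-pass construction; no remainder count or in-place mutation exists in B.
import Mathlib
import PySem

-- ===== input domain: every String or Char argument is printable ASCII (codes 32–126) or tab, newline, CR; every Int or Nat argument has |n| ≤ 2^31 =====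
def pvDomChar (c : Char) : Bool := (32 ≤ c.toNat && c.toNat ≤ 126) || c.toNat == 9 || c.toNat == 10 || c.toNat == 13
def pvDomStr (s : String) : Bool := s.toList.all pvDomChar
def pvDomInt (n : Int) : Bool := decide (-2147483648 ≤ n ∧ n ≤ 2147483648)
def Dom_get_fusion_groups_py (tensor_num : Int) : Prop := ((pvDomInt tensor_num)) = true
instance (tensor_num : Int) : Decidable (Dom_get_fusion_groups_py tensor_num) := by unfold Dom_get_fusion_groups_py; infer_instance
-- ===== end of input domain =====

-- B replaces A's fill-then-increment two-pass group construction by a greedy recursion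
-- handing each slot ceil(remaining/slots) tensors (objective: alternative, same cost).

-- ===== PORT A =====
-- 'group_spec[i] += 1' is ported as List.modify at i.toNat; i is nonnegative and in range here, where this is exact.
def get_fusion_groups_py (tensor_num : Int) : List (List Int) :=
  (PySem.List.pyRange 2 (12 + 1) 1).foldl
    (fun group_specs group_size =>
      let size_per_group := PySem.Int.floordiv tensor_num group_size
      let group_spec := (PySem.List.pyRange 0 group_size 1).map (fun _ => size_per_group)
      let group_spec := (PySem.List.pyRange 0 (tensor_num - size_per_group * group_size) 1).foldl
          (fun sp i => sp.modify i.toNat (· + 1)) group_spec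
      group_specs ++ [group_spec]) []

-- ===== PORT B =====
-- the 'slots' loop counter is a nonnegative count, so it is a Nat recursion parameter
def greedy_alloc (remaining : Int) : Nat → List Int
  | 0 => []
  | slots + 1 =>
    let take := -(PySem.Int.floordiv (-remaining) ((slots : Int) + 1))
    take :: greedy_alloc (remaining - take) slots

def get_fusion_groups_py_alt (tensor_num : Int) : List (List Int) :=
  (PySem.List.pyRange 2 (12 + 1) 1).map (fun group_size => greedy_alloc tensor_num group_size.toNat)

-- ===== PRECONDITION & SPEC =====
def Spec_get_fusion_groups_py (tensor_num : Int) (out : List (List Int)) : Prop := out = get_fusion_groups_py_alt tensor_num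
instance (tensor_num : Int) (out : List (List Int)) : Decidable (Spec_get_fusion_groups_py tensor_num out) := by unfold Spec_get_fusion_groups_py; infer_instance

-- ===== CLAIM (what is proved, stated in full; the proofs are below) =====
def Claim_equal_get_fusion_groups_py : Prop := ∀ (tensor_num : Int), Dom_get_fusion_groups_py tensor_num → Spec_get_fusion_groups_py tensor_num (get_fusion_groups_py tensor_num)

-- ===== LEMMAS AND PROOFS =====

-- the common closed form of one balanced group (proof-only helper)
def part (n g : Int) : List Int :=
  List.replicate (PySem.Int.mod n g).toNat (PySem.Int.floordiv n g + 1)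
    ++ List.replicate (g - PySem.Int.mod n g).toNat (PySem.Int.floordiv n g)

-- modifying at an index just past a prefix modifies the suffix
lemma modify_append_past (f : Int → Int) (i : Nat) : ∀ (l1 l2 : List Int),
    (l1 ++ l2).modify (l1.length + i) f = l1 ++ l2.modify i f := by
  intro l1
  induction l1 with
  | nil => simp
  | cons a t ih =>
    intro l2
    have h : (a :: t).length + i = (t.length + i) + 1 := by simp; omega
    rw [h, List.cons_append, List.modify_succ_cons, ih, List.cons_append]

-- incrementing the first k entries of a constant list, one index at a time
lemma inc_prefix (k : Nat) : ∀ (g : Nat) (q : Int), k ≤ g →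
    (List.range k).foldl (fun sp i => sp.modify i (· + 1)) (List.replicate g q)
      = List.replicate k (q + 1) ++ List.replicate (g - k) q := by
  induction k with
  | zero => intro g q _; simp
  | succ k ih =>
    intro g q hk
    rw [List.range_succ, List.foldl_append, ih g q (by omega)]
    simp only [List.foldl_cons, List.foldl_nil]
    have hpast := modify_append_past (· + 1) 0 (List.replicate k (q + 1)) (List.replicate (g - k) q)
    simp only [List.length_replicate, Nat.add_zero] at hpast
    rw [hpast]
    have hg : g - k = (g - (k + 1)) + 1 := by omega
    rw [hg, List.replicate_succ, List.modify_zero_cons]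
    rw [List.replicate_succ' (n := k), List.append_assoc]
    rfl

-- per group size: A's fill-then-increment equals the closed form
lemma a_group_eq (n g : Int) (hg : 0 < g) :
    (PySem.List.pyRange 0 (n - PySem.Int.floordiv n g * g) 1).foldl
        (fun sp i => sp.modify i.toNat (· + 1))
        ((PySem.List.pyRange 0 g 1).map (fun _ => PySem.Int.floordiv n g))
      = part n g := by
  have hrem : n - PySem.Int.floordiv n g * g = PySem.Int.mod n g := by
    have := PySem.Int.floordiv_mul_add_mod n g; omega
  have h0 : 0 ≤ PySem.Int.mod n g := PySem.Int.mod_nonneg n hg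
  have h1 : PySem.Int.mod n g < g := PySem.Int.mod_lt n hg
  rw [hrem]
  have hconst : (PySem.List.pyRange 0 g 1).map (fun _ => PySem.Int.floordiv n g)
      = List.replicate g.toNat (PySem.Int.floordiv n g) := by
    rw [List.map_const', PySem.List.length_pyRange_one]; congr 1; omega
  rw [hconst, PySem.List.pyRange_one, List.foldl_map]
  have hfn : (fun (sp : List Int) (k : Nat) => sp.modify (((0:Int) + (k:Int))).toNat (· + 1))
      = fun sp k => sp.modify k (· + 1) := by
    funext sp k; simp
  rw [hfn, show ((PySem.Int.mod n g - 0).toNat) = (PySem.Int.mod n g).toNat by omega,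
    inc_prefix _ _ _ (by omega)]
  unfold part
  congr 2
  omega

-- per group size: B's greedy recursion equals the same closed form
lemma greedy_eq (k : Nat) : ∀ (n : Int),
    greedy_alloc n (k + 1) = part n ((k : Int) + 1) := by
  induction k with
  | zero =>
    intro n
    have hq : PySem.Int.floordiv n 1 = n := by
      rw [PySem.Int.floordiv_eq_iff_of_pos (by omega)]; omega
    have hr : PySem.Int.mod n 1 = 0 := by
      have := PySem.Int.floordiv_mul_add_mod n 1; omega
    have ht : -(PySem.Int.floordiv (-n) 1) = n := by
      rw [PySem.Int.neg_floordiv_neg_eq_iff_of_pos (by omega)]; omega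
    simp [greedy_alloc, part]
  | succ k ih =>
    intro n
    set b : Int := (k : Int) + 1 + 1 with hb
    have hbpos : (0:Int) < b := by omega
    set q := PySem.Int.floordiv n b with hqdef
    set r := PySem.Int.mod n b with hrdef
    have hqb : q * b + r = n := PySem.Int.floordiv_mul_add_mod n b
    have hr0 : 0 ≤ r := PySem.Int.mod_nonneg n hbpos
    have hrb : r < b := PySem.Int.mod_lt n hbpos
    have htake : -(PySem.Int.floordiv (-n) b) = q + (if r = 0 then 0 else 1) := by
      rw [PySem.Int.neg_floordiv_neg_eq_iff_of_pos hbpos]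
      split_ifs with h
      · constructor <;> nlinarith
      · have hrpos : 0 < r := lt_of_le_of_ne hr0 (Ne.symm h)
        constructor <;> nlinarith
    show -(PySem.Int.floordiv (-n) b) ::
        greedy_alloc (n - -(PySem.Int.floordiv (-n) b)) (k + 1) = part n b
    rw [htake, ih]
    by_cases h : r = 0
    · have hn' : n - (q + (if r = 0 then 0 else 1)) = q * ((k:Int) + 1) := by
        simp [h] at hqb ⊢; nlinarith
      have hq' : PySem.Int.floordiv (q * ((k:Int)+1)) ((k:Int)+1) = q := by
        rw [PySem.Int.floordiv_eq_iff_of_pos (by omega)]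
        constructor <;> nlinarith
      have hr' : PySem.Int.mod (q * ((k:Int)+1)) ((k:Int)+1) = 0 := by
        have := PySem.Int.floordiv_mul_add_mod (q * ((k:Int)+1)) ((k:Int)+1)
        rw [hq'] at this; omega
      rw [hn']
      unfold part
      rw [hq', hr', ← hqdef, ← hrdef, h]
      simp only [Int.toNat_zero, List.replicate_zero, List.nil_append, Int.sub_zero]
      rw [show (b.toNat) = k + 1 + 1 by omega, show (((k:Int)+1).toNat) = k + 1 by omega]
      simp [List.replicate_succ]
    · have hrpos : 0 < r := lt_of_le_of_ne hr0 (Ne.symm h)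
      have hn' : n - (q + (if r = 0 then 0 else 1)) = q * ((k:Int)+1) + (r - 1) := by
        simp [h] at hqb ⊢; nlinarith
      have hq' : PySem.Int.floordiv (q * ((k:Int)+1) + (r-1)) ((k:Int)+1) = q := by
        rw [PySem.Int.floordiv_eq_iff_of_pos (by omega)]
        constructor <;> nlinarith
      have hr' : PySem.Int.mod (q * ((k:Int)+1) + (r-1)) ((k:Int)+1) = r - 1 := by
        have := PySem.Int.floordiv_mul_add_mod (q * ((k:Int)+1) + (r-1)) ((k:Int)+1)
        rw [hq'] at this; omega
      rw [hn']
      unfold part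
      rw [hq', hr', ← hqdef, ← hrdef]
      rw [if_neg h]
      rw [show (r.toNat) = (r-1).toNat + 1 by omega, List.replicate_succ]
      rw [show ((b - r).toNat) = (((k:Int)+1) - (r-1)).toNat by omega]
      simp

-- ===== VERDICT (by name: the statement is the Claim_ definition above) =====
theorem get_fusion_groups_py_spec : Claim_equal_get_fusion_groups_py := by
  intro n _
  show get_fusion_groups_py n = get_fusion_groups_py_alt n
  unfold get_fusion_groups_py get_fusion_groups_py_alt
  rw [PySem.List.foldl_congr_mem _ _ (fun a g => a ++ [part n g]) _
      (by intro acc g hg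
          have hg2 : 2 ≤ g := (PySem.List.mem_pyRange_one.mp hg).1
          simp only
          rw [a_group_eq n g (by omega)]),
    PySem.List.foldl_append_singleton_eq_map]
  apply List.map_congr_left
  intro g hg
  have hg2 : 2 ≤ g := (PySem.List.mem_pyRange_one.mp hg).1
  have hk : g.toNat = (g.toNat - 1) + 1 := by omega
  rw [hk, greedy_eq]
  congr 1
  omega
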